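-- pv_equiv track=rewrite | github.com/Havaro/cglib | cg/game_notations.py | is_valid_expanded_cgn
-- ===== SOURCE A (Python) =====
-- def is_valid_expanded_cgn(expanded_cgn):
--     """Checks whether a :py:class:`str` is in expanded combinatorial game notation.
--
--     A valid expanded CGN contains only '{', ',', '|' and '}'.
--     The number of '{' is equal to the number of '|' and '}'.
--
--     Parameters
--     ----------
--     expanded_cgn : str
--         The CGN string to check.
--
--     Returns
--     -------
--     valid : bool
--         :py:const:`True` when the CGN is valid, :py:const:`False` otherwise.
--     """
--     if not expanded_cgn:
--         return False
--
--     left = expanded_cgn.count("{")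
--     center = expanded_cgn.count("|")
--     right = expanded_cgn.count("}")
--
--     if left != center or right != center:
--         return False
--
--     for c in expanded_cgn:
--         if c != "{" and c != "|" and c != "}" and c != ",":
--             return False
--     return True
-- ===== SOURCE B (Python) =====
-- def is_valid_expanded_cgn(expanded_cgn):
--     """Count-only check: no per-character validation loop.
--
--     All characters are allowed iff the four allowed characters together
--     account for the entire length of the string.
--     """
--     if not expanded_cgn:
--         return False
--     left = expanded_cgn.count("{")
--     center = expanded_cgn.count("|")
--     right = expanded_cgn.count("}")
--     commas = expanded_cgn.count(",")
--     return left == center == right and left + center + right + commas == len(expanded_cgn)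
-- ===== Notes on version B (the rewrite author's own statement) =====
-- stated objective: alternative
-- what changed: Drops A's per-character validation loop entirely: B checks only counts, using the arithmetic identity that the string is all-allowed iff the counts of the four allowed characters sum to the string length.
import Mathlib
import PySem

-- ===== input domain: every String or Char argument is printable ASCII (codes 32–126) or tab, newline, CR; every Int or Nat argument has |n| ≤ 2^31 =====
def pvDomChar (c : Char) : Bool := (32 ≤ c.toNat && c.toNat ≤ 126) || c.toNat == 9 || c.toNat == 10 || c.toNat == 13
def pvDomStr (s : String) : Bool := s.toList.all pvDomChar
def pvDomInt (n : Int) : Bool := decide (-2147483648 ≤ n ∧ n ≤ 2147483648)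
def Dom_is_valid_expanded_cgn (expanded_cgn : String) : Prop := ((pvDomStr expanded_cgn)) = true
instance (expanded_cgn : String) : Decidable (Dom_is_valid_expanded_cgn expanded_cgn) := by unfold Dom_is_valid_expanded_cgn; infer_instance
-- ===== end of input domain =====

-- B removes A's per-character validation loop: it checks only counts, using the
-- identity "all characters allowed ⟺ the four allowed characters' counts sum to the length".

-- ===== PORT A =====
-- 'for c in expanded_cgn: if c != "{" and …: return False' as an early-exit recursion
def pvAllValidChars : List Char → Bool
  | [] => true
  | c :: t => if c ≠ '{' ∧ c ≠ '|' ∧ c ≠ '}' ∧ c ≠ ',' then false else pvAllValidChars t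

def is_valid_expanded_cgn (expanded_cgn : String) : Bool :=
  if expanded_cgn = "" then false
  else
    let left := PySem.Str.count expanded_cgn "{"
    let center := PySem.Str.count expanded_cgn "|"
    let right := PySem.Str.count expanded_cgn "}"
    if left ≠ center ∨ right ≠ center then false
    else pvAllValidChars expanded_cgn.toList

-- ===== PORT B =====
-- four counts, then a pure arithmetic check against the length; no validation loop
def is_valid_expanded_cgn_alt (expanded_cgn : String) : Bool :=
  if expanded_cgn = "" then false
  else
    let left := PySem.Str.count expanded_cgn "{"
    let center := PySem.Str.count expanded_cgn "|"
    let right := PySem.Str.count expanded_cgn "}"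
    let commas := PySem.Str.count expanded_cgn ","
    (left == center && center == right) &&
      ((left + center + right + commas : Int) == PySem.Str.len expanded_cgn)

-- ===== PRECONDITION & SPEC =====
def Spec_is_valid_expanded_cgn (expanded_cgn : String) (out : Bool) : Prop := out = is_valid_expanded_cgn_alt expanded_cgn
instance (expanded_cgn : String) (out : Bool) : Decidable (Spec_is_valid_expanded_cgn expanded_cgn out) := by unfold Spec_is_valid_expanded_cgn; infer_instance

-- ===== CLAIM =====
def Claim_equal_is_valid_expanded_cgn : Prop := ∀ (expanded_cgn : String), Dom_is_valid_expanded_cgn expanded_cgn → Spec_is_valid_expanded_cgn expanded_cgn (is_valid_expanded_cgn expanded_cgn)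

-- ===== LEMMAS AND PROOFS =====
-- PySem's substring counter, specialised to a single-character needle, counts that character
theorem count_go_singleton (c : Char) (fuel : Nat) (l : List Char) (acc : Nat)
    (h : l.length ≤ fuel) :
    PySem.Chars.count.go [c] fuel l acc = acc + l.count c := by
  induction fuel generalizing l acc with
  | zero =>
    have hl : l = [] := List.eq_nil_of_length_eq_zero (Nat.le_zero.mp h)
    subst hl; simp [PySem.Chars.count.go]
  | succ fuel ih =>
    cases l with
    | nil => simp [PySem.Chars.count.go]
    | cons hd t =>
      have ht : t.length ≤ fuel := by simp at h; omega
      simp only [PySem.Chars.count.go, List.isPrefixOf]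
      by_cases hc : hd = c
      · subst hc
        rw [if_pos (by simp)]
        rw [show (([hd] : List Char)).length = 1 from rfl]
        simp only [List.drop_one, List.tail_cons]
        rw [ih t (acc + 1) ht]
        simp; omega
      · rw [if_neg (by simp [Ne.symm hc])]
        rw [ih t acc ht]
        simp [hc]

theorem chars_count_singleton (s : List Char) (c : Char) :
    PySem.Chars.count s [c] = s.count c := by
  simp [PySem.Chars.count, count_go_singleton c s.length s 0 (le_refl _)]

-- the four allowed characters' counts never exceed the length
theorem count_sum_le (t : List Char) :
    t.count '{' + t.count '|' + t.count '}' + t.count ',' ≤ t.length := by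
  induction t with
  | nil => simp
  | cons hd t ih =>
    simp only [List.count_cons, List.length_cons]
    by_cases h1 : hd = '{' <;> by_cases h2 : hd = '|' <;> by_cases h3 : hd = '}' <;>
      by_cases h4 : hd = ',' <;> simp_all <;> omega

-- A's validation loop is exactly the arithmetic identity B checks
theorem pvAllValidChars_eq_count_sum (t : List Char) :
    pvAllValidChars t =
      decide (t.count '{' + t.count '|' + t.count '}' + t.count ',' = t.length) := by
  induction t with
  | nil => simp [pvAllValidChars]
  | cons hd t ih =>
    have hle := count_sum_le t
    by_cases h1 : hd = '{'
    · subst h1; simp [pvAllValidChars, ih]; constructor <;> (intro h; omega)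
    · by_cases h2 : hd = '|'
      · subst h2; simp [pvAllValidChars, ih]; constructor <;> (intro h; omega)
      · by_cases h3 : hd = '}'
        · subst h3; simp [pvAllValidChars, ih]; constructor <;> (intro h; omega)
        · by_cases h4 : hd = ','
          · subst h4; simp [pvAllValidChars, ih]; constructor <;> (intro h; omega)
          · have hcond : hd ≠ '{' ∧ hd ≠ '|' ∧ hd ≠ '}' ∧ hd ≠ ',' := ⟨h1, h2, h3, h4⟩
            simp only [pvAllValidChars, if_pos hcond, List.count_cons, List.length_cons]
            simp [h1, h2, h3, h4]
            omega

-- A's "counts first, then validate" equals B's conjunction shape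
theorem guard_combine (a b c : Nat) (v : Bool) :
    (if a ≠ b ∨ c ≠ b then false else v) = ((a == b && b == c) && v) := by
  split_ifs with h
  · rcases h with h | h <;> simp_all [Ne.symm]
  · rw [not_or, not_not, not_not] at h
    simp [h.1, h.2]

-- ===== VERDICT =====
theorem is_valid_expanded_cgn_spec : Claim_equal_is_valid_expanded_cgn := by
  intro s _
  unfold Spec_is_valid_expanded_cgn is_valid_expanded_cgn is_valid_expanded_cgn_alt
  by_cases hs : s = ""
  · simp [hs]
  · rw [if_neg hs, if_neg hs]
    have h1 : PySem.Str.count s "{" = s.toList.count '{' := chars_count_singleton s.toList '{'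
    have h2 : PySem.Str.count s "|" = s.toList.count '|' := chars_count_singleton s.toList '|'
    have h3 : PySem.Str.count s "}" = s.toList.count '}' := chars_count_singleton s.toList '}'
    have h4 : PySem.Str.count s "," = s.toList.count ',' := chars_count_singleton s.toList ','
    simp only [h1, h2, h3, h4, guard_combine, pvAllValidChars_eq_count_sum,
      PySem.Str.len_eq]
    congr 1
    rw [Bool.eq_iff_iff]
    simp only [beq_iff_eq, decide_eq_true_eq]
    omega
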